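-- pv_equiv track=rewrite | github.com/RCRRTOW3R2/EPL_PROPHET | .history/predictions/weekend_predictions_20250903163900.py | is_complacency_team
-- ===== SOURCE A (Python) =====
-- def is_complacency_team(recent_matches):
--     """Check if team gets complacent"""
--     if len(recent_matches) < 4:
--         return False
--     inconsistent = 0
--     for i in range(len(recent_matches) - 1):
--         if recent_matches[i+1]['result'] == 'W' and recent_matches[i]['result'] == 'L':
--             inconsistent += 1
--     return inconsistent >= 2
-- ===== SOURCE B (Python) =====
-- def is_complacency_team(recent_matches):
--     """Check if team gets complacent"""
--     if len(recent_matches) < 4: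
--         return False
--     form = ''.join(
--         'W' if m['result'] == 'W' else 'L' if m['result'] == 'L' else '.'
--         for m in recent_matches)
--     # 'LW' cannot overlap itself, so the non-overlapping substring count
--     # equals the number of loss-then-win transitions.
--     return form.count('LW') >= 2
-- ===== Notes on version B (the rewrite author's own statement) =====
-- stated objective: idiomatic
-- what changed: Replaces the indexed pair loop with a normalized form string ('W'/'L'/'.') and delegates the transition count to str.count('LW'), which equals the pair count since 'LW' cannot overlap itself.
import Mathlib
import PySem

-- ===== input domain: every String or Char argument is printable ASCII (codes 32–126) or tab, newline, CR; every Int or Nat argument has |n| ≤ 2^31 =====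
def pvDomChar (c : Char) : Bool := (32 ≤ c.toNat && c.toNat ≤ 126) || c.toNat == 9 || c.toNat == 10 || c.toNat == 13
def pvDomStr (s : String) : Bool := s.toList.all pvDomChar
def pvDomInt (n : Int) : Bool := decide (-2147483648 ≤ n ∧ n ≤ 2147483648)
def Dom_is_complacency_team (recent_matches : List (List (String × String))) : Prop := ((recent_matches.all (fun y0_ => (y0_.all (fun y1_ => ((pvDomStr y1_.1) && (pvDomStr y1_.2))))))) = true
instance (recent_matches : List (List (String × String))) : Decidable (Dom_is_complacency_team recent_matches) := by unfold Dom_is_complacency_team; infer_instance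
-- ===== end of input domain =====

-- B differs from A by building a normalized form string and counting the substring 'LW'
-- instead of A's indexed pair loop; equal return values are proved below (objective: idiomatic).

-- shared helper: first-match association-list lookup m['result'] (none = KeyError, excluded by Pre_)
def pvRes (m : List (String × String)) : Option String :=
  (m.find? (fun p => p.1 == "result")).map Prod.snd

-- ===== PORT A =====
-- rm[i]['result'] as an Option; A compares it with 'W'/'L'
def pvResAt (rm : List (List (String × String))) (i : Int) : Option String :=
  (PySem.List.pyGet? rm i).bind pvRes

def is_complacency_team (recent_matches : List (List (String × String))) : Bool :=
  if recent_matches.length < 4 then false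
  else
    let inconsistent : Int :=
      (PySem.List.pyRange 0 ((recent_matches.length : Int) - 1) 1).foldl
        (fun acc i =>
          if (pvResAt recent_matches (i + 1) == some "W") &&
             (pvResAt recent_matches i == some "L") then acc + 1 else acc) 0
    decide (2 ≤ inconsistent)

-- ===== PORT B =====
def pvNorm (m : List (String × String)) : Char :=
  if pvRes m == some "W" then 'W' else if pvRes m == some "L" then 'L' else '.'

def is_complacency_team_alt (recent_matches : List (List (String × String))) : Bool :=
  if recent_matches.length < 4 then false
  else
    let form : String := String.ofList (recent_matches.map pvNorm)
    decide (2 ≤ PySem.Str.count form "LW")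

-- ===== PRECONDITION & SPEC =====
-- Pre_ excludes exactly the inputs where Python A (and B) raise KeyError: a list of
-- length ≥ 4 in which some match dict lacks the key 'result'.
def Pre_is_complacency_team (recent_matches : List (List (String × String))) : Prop :=
  recent_matches.length < 4 ∨
    ∀ m ∈ recent_matches, (m.any (fun p => p.1 == "result")) = true

instance (recent_matches : List (List (String × String))) : Decidable (Pre_is_complacency_team recent_matches) := by
  unfold Pre_is_complacency_team; infer_instance

def pvWitness_is_complacency_team : (List (List (String × String))) :=
  [[("result", "L")], [("result", "W")], [("result", "L")], [("result", "W")]]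

def Spec_is_complacency_team (recent_matches : List (List (String × String))) (out : Bool) : Prop := out = is_complacency_team_alt recent_matches
instance (recent_matches : List (List (String × String))) (out : Bool) : Decidable (Spec_is_complacency_team recent_matches out) := by unfold Spec_is_complacency_team; infer_instance

-- ===== CLAIM (what is proved, stated in full; the proofs are below) =====
def Claim_equal_is_complacency_team : Prop := ∀ (recent_matches : List (List (String × String))), Dom_is_complacency_team recent_matches → Pre_is_complacency_team recent_matches → Spec_is_complacency_team recent_matches (is_complacency_team recent_matches)

-- ===== LEMMAS AND PROOFS =====

-- number of adjacent ('L','W') pairs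
def lwCount : List Char → Nat
  | [] => 0
  | [_] => 0
  | a :: b :: t => (if a = 'L' ∧ b = 'W' then 1 else 0) + lwCount (b :: t)

theorem lwCount_W_cons (t : List Char) : lwCount ('W' :: t) = lwCount t := by
  cases t with
  | nil => rfl
  | cons b t' => simp [lwCount]

theorem count_go_eq (fuel : Nat) : ∀ (cs : List Char) (acc : Nat), cs.length ≤ fuel →
    PySem.Chars.count.go ['L', 'W'] fuel cs acc = acc + lwCount cs := by
  induction fuel with
  | zero =>
    intro cs acc h
    have : cs = [] := List.length_eq_zero_iff.mp (Nat.le_zero.mp h)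
    subst this; rfl
  | succ fuel ih =>
    intro cs acc h
    cases cs with
    | nil => rfl
    | cons c t =>
      by_cases hpre : (['L', 'W'] : List Char).isPrefixOf (c :: t) = true
      · obtain ⟨s, hs⟩ := (List.isPrefixOf_iff_prefix.mp hpre : _)
        cases hs
        rw [PySem.Chars.count.go]
        simp only [hpre, if_true]
        have hlen : s.length ≤ fuel := by simp at h; omega
        show PySem.Chars.count.go ['L', 'W'] fuel s (acc + 1) = acc + lwCount ('L' :: 'W' :: s)
        rw [ih s (acc + 1) hlen]
        simp [lwCount, lwCount_W_cons]
        omega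
      · rw [PySem.Chars.count.go]
        simp only [hpre, if_false, Bool.false_eq_true]
        have hlen : t.length ≤ fuel := by simp at h; omega
        rw [ih t acc hlen]
        cases t with
        | nil => rfl
        | cons b t' =>
          have : ¬(c = 'L' ∧ b = 'W') := by
            intro ⟨h1, h2⟩
            subst h1; subst h2
            simp [List.isPrefixOf] at hpre
          simp [lwCount, this]

theorem chars_count_eq (cs : List Char) :
    PySem.Chars.count cs ['L', 'W'] = lwCount cs := by
  rw [PySem.Chars.count]
  simp only [List.isEmpty_cons, if_false, Bool.false_eq_true]
  simpa using count_go_eq cs.length cs 0 le_rfl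

theorem pvNorm_eq_W (m : List (String × String)) :
    (pvNorm m = 'W') ↔ pvRes m = some "W" := by
  unfold pvNorm
  split_ifs with h1 h2 <;> simp_all

theorem pvNorm_eq_L (m : List (String × String)) :
    (pvNorm m = 'L') ↔ pvRes m = some "L" := by
  unfold pvNorm
  split_ifs with h1 h2 <;> simp_all

theorem pvResAt_cons (m : List (String × String)) (l : List (List (String × String)))
    (i : Int) (hi : 0 ≤ i) : pvResAt (m :: l) (i + 1) = pvResAt l i := by
  obtain ⟨n, rfl⟩ := Int.eq_ofNat_of_zero_le hi
  unfold pvResAt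
  rw [show ((n : Int) + 1) = ((n + 1 : Nat) : Int) by push_cast; ring,
    PySem.List.pyGet?_natCast, PySem.List.pyGet?_natCast]
  simp

theorem pvResAt_zero (m : List (String × String)) (l : List (List (String × String))) :
    pvResAt (m :: l) ((0 : Nat) : Int) = pvRes m := by
  unfold pvResAt
  rw [PySem.List.pyGet?_natCast]
  simp

theorem countIdx (rm : List (List (String × String))) :
    ((List.range (rm.length - 1)).countP
      (fun k : Nat => (pvResAt rm ((k : Int) + 1) == some "W") && (pvResAt rm ((k : Int)) == some "L")))
      = lwCount (rm.map pvNorm) := by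
  induction rm with
  | nil => rfl
  | cons m1 rest ih =>
    cases rest with
    | nil => rfl
    | cons m2 rest' =>
      have hlen : (m1 :: m2 :: rest').length - 1 = rest'.length + 1 := by simp
      rw [hlen, List.range_succ_eq_map, List.countP_cons, List.countP_map]
      have hcongr :
          (List.range rest'.length).countP
            ((fun k : Nat => (pvResAt (m1 :: m2 :: rest') ((k : Int) + 1) == some "W") &&
              (pvResAt (m1 :: m2 :: rest') ((k : Int)) == some "L")) ∘ Nat.succ)
          = (List.range rest'.length).countP
            (fun k : Nat => (pvResAt (m2 :: rest') ((k : Int) + 1) == some "W") &&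
              (pvResAt (m2 :: rest') ((k : Int)) == some "L")) := by
        apply List.countP_congr
        intro k _
        simp only [Function.comp_apply]
        have hc : ((Nat.succ k : Nat) : Int) = (k : Int) + 1 := by push_cast; ring
        rw [hc, pvResAt_cons m1 (m2 :: rest') ((k : Int) + 1) (by positivity),
          pvResAt_cons m1 (m2 :: rest') (k : Int) (by positivity)]
      rw [hcongr]
      have ih' := ih
      simp only [List.length_cons, Nat.add_sub_cancel] at ih'
      rw [ih']
      have h0 : pvResAt (m1 :: m2 :: rest') (((0 : Nat) : Int)) = pvRes m1 := pvResAt_zero _ _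
      have h1 : pvResAt (m1 :: m2 :: rest') (((0 : Nat) : Int) + 1) = pvRes m2 := by
        rw [pvResAt_cons _ _ _ (by norm_num)]
        exact pvResAt_zero _ _
      rw [h0, h1]
      show _ = lwCount (pvNorm m1 :: pvNorm m2 :: rest'.map pvNorm)
      rw [lwCount]
      by_cases hc : pvNorm m1 = 'L' ∧ pvNorm m2 = 'W'
      · have hL := (pvNorm_eq_L m1).mp hc.1
        have hW := (pvNorm_eq_W m2).mp hc.2
        simp [hL, hW, hc]
        omega
      · have hb : ¬(((pvRes m2 == some "W") && (pvRes m1 == some "L")) = true) := by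
          intro hb
          simp at hb
          exact hc ⟨(pvNorm_eq_L m1).mpr hb.2, (pvNorm_eq_W m2).mpr hb.1⟩
        simp [hb, hc]

-- ===== VERDICT (by name: the statement is the Claim_ definition above) =====
theorem is_complacency_team_spec : Claim_equal_is_complacency_team := by
  intro rm _ _
  unfold Spec_is_complacency_team is_complacency_team is_complacency_team_alt
  by_cases hlen : rm.length < 4
  · simp [hlen]
  · simp only [hlen, if_false]
    rw [PySem.Str.count_eq, show (String.ofList (rm.map pvNorm)).toList = rm.map pvNorm by simp,
      show ("LW" : String).toList = ['L', 'W'] from rfl, chars_count_eq]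
    rw [PySem.List.pyRange_one]
    have htn : (((rm.length : Int) - 1) - 0).toNat = rm.length - 1 := by omega
    rw [htn, List.foldl_map]
    rw [PySem.List.foldl_if_add_one
      (fun k : Nat => (pvResAt rm ((0 : Int) + (k : Int) + 1) == some "W") &&
        (pvResAt rm ((0 : Int) + (k : Int)) == some "L"))]
    simp only [zero_add]
    rw [countIdx]
    simp
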